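-- pv_equiv track=rewrite | github.com/tadimkamba29-sudo/clerkkase | api/clarification_engine.py | _drugs_conflict
-- ===== SOURCE A (Python) =====
-- from typing import Any, Dict, List, Optional
--
-- DRUG_CLASS_MAP: Dict[str, List[str]] = {
--     # Penicillins
--     "penicillin":    ["amoxicillin", "ampicillin", "flucloxacillin",
--                       "co-amoxiclav", "piperacillin", "tazobactam",
--                       "benzylpenicillin", "phenoxymethylpenicillin"],
--     "amoxicillin":   ["amoxicillin", "co-amoxiclav"],
--     # Cephalosporins (partial cross-react with penicillin)
--     "cephalosporin": ["cefalexin", "cefuroxime", "ceftriaxone",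
--                       "cefotaxime", "ceftazidime", "cefadroxil"],
--     # Sulfonamides
--     "sulfonamide":   ["trimethoprim-sulfamethoxazole", "co-trimoxazole",
--                       "sulfamethoxazole", "sulfadiazine"],
--     # NSAIDs
--     "nsaid":         ["ibuprofen", "diclofenac", "naproxen",
--                       "indomethacin", "ketorolac", "mefenamic acid"],
--     "aspirin":       ["aspirin", "acetylsalicylic acid", "dispirin"],
--     # Opioids
--     "morphine":      ["morphine", "codeine", "tramadol"],
--     # Contrast
--     "contrast":      ["iodine contrast", "contrast media"],
--     # Latex
--     "latex":         ["latex", "rubber"],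
-- }
--
-- def _normalize_drug(name: str) -> str:
--     return name.lower().strip()
--
-- def _drugs_conflict(allergen: str, prescribed: str) -> bool:
--     """
--     Return True if *prescribed* belongs to the same class as *allergen*
--     or is the same drug.
--     """
--     a = _normalize_drug(allergen)
--     p = _normalize_drug(prescribed)
--
--     if a == p:
--         return True
--
--     # Check if allergen is a class key
--     related = DRUG_CLASS_MAP.get(a, [])
--     if p in related:
--         return True
--
--     # Check if allergen is a member of any class that also contains prescribed
--     for class_members in DRUG_CLASS_MAP.values():
--         if a in class_members and p in class_members:
--             return True
--
--     return False
-- ===== SOURCE B (Python) =====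
-- from typing import Dict, List
--
-- DRUG_CLASS_MAP: Dict[str, List[str]] = {
--     "penicillin":    ["amoxicillin", "ampicillin", "flucloxacillin",
--                       "co-amoxiclav", "piperacillin", "tazobactam",
--                       "benzylpenicillin", "phenoxymethylpenicillin"],
--     "amoxicillin":   ["amoxicillin", "co-amoxiclav"],
--     "cephalosporin": ["cefalexin", "cefuroxime", "ceftriaxone",
--                       "cefotaxime", "ceftazidime", "cefadroxil"],
--     "sulfonamide":   ["trimethoprim-sulfamethoxazole", "co-trimoxazole",
--                       "sulfamethoxazole", "sulfadiazine"],
--     "nsaid":         ["ibuprofen", "diclofenac", "naproxen",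
--                       "indomethacin", "ketorolac", "mefenamic acid"],
--     "aspirin":       ["aspirin", "acetylsalicylic acid", "dispirin"],
--     "morphine":      ["morphine", "codeine", "tramadol"],
--     "contrast":      ["iodine contrast", "contrast media"],
--     "latex":         ["latex", "rubber"],
-- }
--
-- def _normalize_drug(name: str) -> str:
--     return name.lower().strip()
--
-- def _classes_containing(drug: str) -> List[str]:
--     """All class keys whose member list contains *drug*."""
--     return [cls for cls, members in DRUG_CLASS_MAP.items() if drug in members]
--
-- def _drugs_conflict(allergen: str, prescribed: str) -> bool:
--     a = _normalize_drug(allergen)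
--     p = _normalize_drug(prescribed)
--     if a == p:
--         return True
--     if p in DRUG_CLASS_MAP.get(a, []):
--         return True
--     prescribed_classes = _classes_containing(p)
--     return any(c in prescribed_classes for c in _classes_containing(a))
-- ===== Notes on version B (the rewrite author's own statement) =====
-- stated objective: alternative
-- what changed: The fused scan over all class member-lists testing both drugs at once is replaced by computing the list of classes containing each drug separately and testing whether the two class lists intersect (correct because class keys are unique).
import Mathlib
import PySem

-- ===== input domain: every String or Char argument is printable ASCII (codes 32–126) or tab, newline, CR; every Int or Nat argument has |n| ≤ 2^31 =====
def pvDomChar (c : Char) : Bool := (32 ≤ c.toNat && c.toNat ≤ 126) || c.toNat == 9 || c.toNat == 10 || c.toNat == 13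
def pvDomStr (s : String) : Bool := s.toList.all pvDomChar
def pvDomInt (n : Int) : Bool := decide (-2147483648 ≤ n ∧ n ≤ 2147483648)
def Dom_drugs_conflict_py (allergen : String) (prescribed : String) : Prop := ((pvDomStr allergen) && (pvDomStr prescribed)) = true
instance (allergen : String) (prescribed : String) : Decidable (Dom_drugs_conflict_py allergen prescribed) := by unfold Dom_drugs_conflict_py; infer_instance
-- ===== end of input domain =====

-- B replaces A's fused scan (one loop testing both drugs per member-list) by computing each
-- drug's list of containing classes and testing whether the two class lists intersect.

-- module-level constant DRUG_CLASS_MAP, shared by both Pythons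
def drugClassDict : PySem.Dict String (List String) := PySem.Dict.ofList
  [ ("penicillin",    ["amoxicillin", "ampicillin", "flucloxacillin",
                       "co-amoxiclav", "piperacillin", "tazobactam",
                       "benzylpenicillin", "phenoxymethylpenicillin"]),
    ("amoxicillin",   ["amoxicillin", "co-amoxiclav"]),
    ("cephalosporin", ["cefalexin", "cefuroxime", "ceftriaxone",
                       "cefotaxime", "ceftazidime", "cefadroxil"]),
    ("sulfonamide",   ["trimethoprim-sulfamethoxazole", "co-trimoxazole",
                       "sulfamethoxazole", "sulfadiazine"]),
    ("nsaid",         ["ibuprofen", "diclofenac", "naproxen",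
                       "indomethacin", "ketorolac", "mefenamic acid"]),
    ("aspirin",       ["aspirin", "acetylsalicylic acid", "dispirin"]),
    ("morphine",      ["morphine", "codeine", "tramadol"]),
    ("contrast",      ["iodine contrast", "contrast media"]),
    ("latex",         ["latex", "rubber"]) ]

-- ===== PORT A =====
-- _normalize_drug
def normalizeDrugA (name : String) : String := PySem.Str.strip (PySem.Str.lower name)

def drugs_conflict_py (allergen : String) (prescribed : String) : Bool :=
  let a := normalizeDrugA allergen
  let p := normalizeDrugA prescribed
  if a == p then true
  else if (drugClassDict.getD a []).contains p then true
  -- for class_members in DRUG_CLASS_MAP.values(): if a in ... and p in ...: return True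
  else if (drugClassDict.values).any (fun cm => cm.contains a && cm.contains p) then true
  else false

-- ===== PORT B =====
-- _normalize_drug (Source B's own copy)
def normalizeDrugB (name : String) : String := PySem.Str.strip (PySem.Str.lower name)

-- _classes_containing
def classesContaining (drug : String) : List String :=
  ((drugClassDict.items).filter (fun kv => kv.2.contains drug)).map (fun kv => kv.1)

def drugs_conflict_py_alt (allergen : String) (prescribed : String) : Bool :=
  let a := normalizeDrugB allergen
  let p := normalizeDrugB prescribed
  if a == p then true
  else if (drugClassDict.getD a []).contains p then true
  else
    let prescribedClasses := classesContaining p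
    (classesContaining a).any (fun c => prescribedClasses.contains c)

-- ===== PRECONDITION & SPEC =====
def Spec_drugs_conflict_py (allergen : String) (prescribed : String) (out : Bool) : Prop := out = drugs_conflict_py_alt allergen prescribed
instance (allergen : String) (prescribed : String) (out : Bool) : Decidable (Spec_drugs_conflict_py allergen prescribed out) := by unfold Spec_drugs_conflict_py; infer_instance

-- ===== CLAIM (what is proved, stated in full; the proofs are below) =====
def Claim_equal_drugs_conflict_py : Prop := ∀ (allergen : String) (prescribed : String), Dom_drugs_conflict_py allergen prescribed → Spec_drugs_conflict_py allergen prescribed (drugs_conflict_py allergen prescribed)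

-- ===== LEMMAS AND PROOFS =====

-- the class-list intersection test equals the fused two-membership scan, for any map with distinct keys
theorem inter_any_eq (m : List (String × List String)) (h : (m.map Prod.fst).Nodup)
    (a p : String) :
    ((m.filter (fun kv => kv.2.contains a)).map Prod.fst).any
        (fun c => ((m.filter (fun kv => kv.2.contains p)).map Prod.fst).contains c)
      = m.any (fun kv => kv.2.contains a && kv.2.contains p) := by
  rw [Bool.eq_iff_iff]
  simp only [List.any_eq_true, List.mem_map, List.mem_filter, List.contains_iff_mem,
    Bool.and_eq_true]
  constructor
  · rintro ⟨c, ⟨⟨kv₁, ⟨hm₁, ha⟩, hc₁⟩, kv₂, ⟨hm₂, hp⟩, hc₂⟩⟩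
    have : kv₁ = kv₂ := List.inj_on_of_nodup_map h hm₁ hm₂ (hc₁.trans hc₂.symm)
    exact ⟨kv₁, hm₁, ha, this ▸ hp⟩
  · rintro ⟨kv, hm, ha, hp⟩
    exact ⟨kv.1, ⟨kv, ⟨hm, ha⟩, rfl⟩, kv, ⟨hm, hp⟩, rfl⟩

set_option maxHeartbeats 1000000 in
theorem drugClassDict_keys_nodup : ((drugClassDict.items).map Prod.fst).Nodup := by decide

theorem values_eq_items_map :
    drugClassDict.values = (drugClassDict.items).map Prod.snd := rfl

theorem branch_core (a p : String) :
    (if a == p then true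
     else if (drugClassDict.getD a []).contains p then true
     else if (drugClassDict.values).any (fun cm => cm.contains a && cm.contains p) then true
     else false)
  = (if a == p then true
     else if (drugClassDict.getD a []).contains p then true
     else (classesContaining a).any (fun c => (classesContaining p).contains c)) := by
  by_cases h1 : (a == p) = true
  · rw [if_pos h1, if_pos h1]
  · rw [if_neg h1, if_neg h1]
    by_cases h2 : ((drugClassDict.getD a []).contains p) = true
    · rw [if_pos h2, if_pos h2]
    · rw [if_neg h2, if_neg h2]
      have key : (classesContaining a).any (fun c => (classesContaining p).contains c)
               = (drugClassDict.values).any (fun cm => cm.contains a && cm.contains p) := by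
        rw [values_eq_items_map, List.any_map]
        rw [show (classesContaining a) =
              ((drugClassDict.items.filter (fun kv => kv.2.contains a)).map Prod.fst) from rfl,
            show (classesContaining p) =
              ((drugClassDict.items.filter (fun kv => kv.2.contains p)).map Prod.fst) from rfl,
            inter_any_eq drugClassDict.items drugClassDict_keys_nodup a p]
        rfl
      cases hX : (drugClassDict.values).any (fun cm => cm.contains a && cm.contains p) with
      | true  => rw [if_pos rfl, key, hX]
      | false => rw [if_neg (by decide), key, hX]

-- ===== VERDICT (by name: the statement is the Claim_ definition above) =====
theorem drugs_conflict_py_spec : Claim_equal_drugs_conflict_py := by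
  intro allergen prescribed _
  show drugs_conflict_py allergen prescribed = drugs_conflict_py_alt allergen prescribed
  rw [drugs_conflict_py, drugs_conflict_py_alt]
  exact branch_core (normalizeDrugA allergen) (normalizeDrugA prescribed)
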